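-- pv_equiv track=rewrite | github.com/MdShihabAhmed/PracticeAndContest | UAP/UAP_team_formation_contest_4/D.py | dfs
-- ===== SOURCE A (Python) =====
-- def dfs(graph, n, c):
--     visited = [False]*(n+1)
--     result = 0
--     for i in range(1, n+1):
--         tempC = 0
--         if not visited[i]:
--             tempC = c[i-1]
--             stack = [i]
--             visited[i] = True
--             while(stack):
--                 temp = stack.pop()
--                 for child in graph[temp]:
--                     if not visited[child]:
--                         stack.append(child)
--                         visited[child] = True
--                         tempC = min(tempC,c[child-1])
--         result+=tempC
--     return result
-- ===== SOURCE B (Python) =====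
-- def dfs(graph, n, c):
--     # Two-phase rewrite: label each node with a component id in discovery
--     # order, then aggregate the per-component minimum cost afterwards.
--     comp = [0] * (n + 1)
--     order = []
--     cid = 0
--     for i in range(1, n + 1):
--         if comp[i] == 0:
--             cid += 1
--             comp[i] = cid
--             order.append(i)
--             stack = [i]
--             while stack:
--                 temp = stack.pop()
--                 for child in graph[temp]:
--                     if comp[child] == 0:
--                         comp[child] = cid
--                         order.append(child)
--                         stack.append(child)
--     return sum(min(c[v - 1] for v in order if comp[v] == k)
--                for k in range(1, cid + 1))
-- ===== Notes on version B (the rewrite author's own statement) =====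
-- stated objective: alternative
-- what changed: A folds the running minimum and the running sum inline during a single DFS sweep; B decomposes the task into a labeling phase (the same stack DFS, but assigning component ids and recording discovery order) followed by a separate aggregation phase that computes each component's minimum cost and sums them.
-- outside the precondition, e.g. on dfs({1: [0], 0: []}, 1, [7, 3]): A returns 3, B returns 3; on dfs({1: [2]}, 1, [7]): A raises IndexError, B raises IndexError
import Mathlib
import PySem

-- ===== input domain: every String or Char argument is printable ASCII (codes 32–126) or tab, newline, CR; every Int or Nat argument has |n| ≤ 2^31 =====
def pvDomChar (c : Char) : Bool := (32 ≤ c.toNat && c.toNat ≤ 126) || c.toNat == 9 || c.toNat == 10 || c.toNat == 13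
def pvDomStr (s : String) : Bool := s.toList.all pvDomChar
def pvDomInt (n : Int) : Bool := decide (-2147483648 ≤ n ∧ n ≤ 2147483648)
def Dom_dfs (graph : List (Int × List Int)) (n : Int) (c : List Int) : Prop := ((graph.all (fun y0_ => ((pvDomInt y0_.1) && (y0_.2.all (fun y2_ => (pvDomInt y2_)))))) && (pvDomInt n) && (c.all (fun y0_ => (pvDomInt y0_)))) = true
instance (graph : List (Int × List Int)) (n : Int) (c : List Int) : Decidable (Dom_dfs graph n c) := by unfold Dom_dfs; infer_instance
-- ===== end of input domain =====

-- B relabels: one DFS phase assigning component ids in discovery order, then a separate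
-- aggregation phase computing each component's minimum cost; same return value as A on Pre_.

-- graph[temp] (dict lookup, first match); KeyError is excluded by Pre_dfs, where the
-- default [] is never used.
def graphGet (graph : List (Int × List Int)) (k : Int) : List Int :=
  PySem.Dict.getD ⟨graph⟩ k []

-- ===== PORT A =====
-- body of "for child in graph[temp]", state (visited, stack, tempC)
def dfsChildA (c : List Int) (st : List Bool × List Int × Int) (child : Int) :
    List Bool × List Int × Int :=
  if PySem.List.pyGetD st.1 child false = false then
    (PySem.List.pySetD st.1 child true, st.2.1 ++ [child],
     min st.2.2 (PySem.List.pyGetD c (child - 1) 0))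
  else st

-- "while stack:" — fuel-bounded; fuel = len(visited)+1 always suffices (the measure
-- #unvisited + len(stack) decreases each iteration), so the fuel guard only totalizes.
def dfsWhileA (graph : List (Int × List Int)) (c : List Int) :
    Nat → List Bool → List Int → Int → List Bool × Int
  | 0, visited, _, tempC => (visited, tempC)
  | fuel + 1, visited, stack, tempC =>
    match PySem.List.pop? stack with
    | none => (visited, tempC)
    | some (temp, rest) =>
      let st := (graphGet graph temp).foldl (dfsChildA c) (visited, rest, tempC)
      dfsWhileA graph c fuel st.1 st.2.1 st.2.2

-- body of the outer "for i in range(1, n+1)" loop, state (visited, result)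
def dfsRootA (graph : List (Int × List Int)) (c : List Int) (st : List Bool × Int) (i : Int) :
    List Bool × Int :=
  if PySem.List.pyGetD st.1 i false = false then
    let visited := PySem.List.pySetD st.1 i true
    let r := dfsWhileA graph c (visited.length + 1) visited [i]
               (PySem.List.pyGetD c (i - 1) 0)
    (r.1, st.2 + r.2)
  else (st.1, st.2 + 0)

def dfs (graph : List (Int × List Int)) (n : Int) (c : List Int) : Int :=
  ((PySem.List.pyRange 1 (n + 1)).foldl (dfsRootA graph c)
    (List.replicate (n + 1).toNat false, 0)).2

-- ===== PORT B =====
-- body of "for child in graph[temp]", state (comp, order, stack)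
def dfsChildB (cid : Int) (st : List Int × List Int × List Int) (child : Int) :
    List Int × List Int × List Int :=
  if PySem.List.pyGetD st.1 child 0 = 0 then
    (PySem.List.pySetD st.1 child cid, st.2.1 ++ [child], st.2.2 ++ [child])
  else st

def dfsWhileB (graph : List (Int × List Int)) (cid : Int) :
    Nat → List Int → List Int → List Int → List Int × List Int
  | 0, comp, order, _ => (comp, order)
  | fuel + 1, comp, order, stack =>
    match PySem.List.pop? stack with
    | none => (comp, order)
    | some (temp, rest) =>
      let st := (graphGet graph temp).foldl (dfsChildB cid) (comp, order, rest)
      dfsWhileB graph cid fuel st.1 st.2.1 st.2.2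

-- min(c[v-1] for v in order if comp[v] == k); the component of a used id k is never
-- empty, so the none branch is unreachable.
def dfsCompMin (c comp order : List Int) (k : Int) : Int :=
  match PySem.List.min?
      ((order.filter (fun v => PySem.List.pyGetD comp v 0 == k)).map
        (fun v => PySem.List.pyGetD c (v - 1) 0)) (fun y => y) with
  | some m => m
  | none => 0

-- body of the labeling "for i in range(1, n+1)" loop, state (comp, order, cid)
def dfsRootB (graph : List (Int × List Int)) (st : List Int × List Int × Int) (i : Int) :
    List Int × List Int × Int :=
  if PySem.List.pyGetD st.1 i 0 = 0 then
    let cid := st.2.2 + 1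
    let comp := PySem.List.pySetD st.1 i cid
    let order := st.2.1 ++ [i]
    let r := dfsWhileB graph cid (comp.length + 1) comp order [i]
    (r.1, r.2, cid)
  else st

def dfs_alt (graph : List (Int × List Int)) (n : Int) (c : List Int) : Int :=
  let st := (PySem.List.pyRange 1 (n + 1)).foldl (dfsRootB graph)
    (List.replicate (n + 1).toNat (0 : Int), [], 0)
  ((PySem.List.pyRange 1 (st.2.2 + 1)).map (dfsCompMin c st.1 st.2.1)).sum

-- ===== PRECONDITION & SPEC =====
-- Pre_dfs excludes inputs where A raises (a node 1..n missing from graph → KeyError;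
-- too-short c or a neighbour beyond n+1 or below -(n+2) → IndexError) and inputs with a
-- neighbour outside 1..n on which A still returns via Python's negative-index/0 wraparound
-- aliasing into visited and c (B, using the same indexing, happens to agree there).
def Pre_dfs (graph : List (Int × List Int)) (n : Int) (c : List Int) : Prop :=
  n ≤ (c.length : Int) ∧
  (∀ i ∈ PySem.List.pyRange 1 (n + 1), (PySem.Dict.get? ⟨graph⟩ i).isSome = true) ∧
  (∀ p ∈ graph, 1 ≤ p.1 → p.1 ≤ n → ∀ ch ∈ p.2, 1 ≤ ch ∧ ch ≤ n)
instance (graph : List (Int × List Int)) (n : Int) (c : List Int) : Decidable (Pre_dfs graph n c) := by unfold Pre_dfs; infer_instance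

def pvWitness_dfs : (List (Int × List Int)) × Int × List Int :=
  ([(1, [2]), (2, [1]), (3, [])], 3, [5, 2, 7])

def Spec_dfs (graph : List (Int × List Int)) (n : Int) (c : List Int) (out : Int) : Prop := out = dfs_alt graph n c
instance (graph : List (Int × List Int)) (n : Int) (c : List Int) (out : Int) : Decidable (Spec_dfs graph n c out) := by unfold Spec_dfs; infer_instance

-- ===== CLAIM (what is proved, stated in full; the proofs are below) =====
def Claim_equal_dfs : Prop := ∀ (graph : List (Int × List Int)) (n : Int) (c : List Int), Dom_dfs graph n c → Pre_dfs graph n c → Spec_dfs graph n c (dfs graph n c)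

-- ===== LEMMAS AND PROOFS =====

-- minimum of a nonempty list, as Python's min() computes it
def minNE : List Int → Int
  | [] => 0
  | x :: xs => xs.foldl min x

-- the members of component k, in discovery order
def memK (comp order : List Int) (k : Int) : List Int :=
  order.filter (fun v => PySem.List.pyGetD comp v 0 == k)

lemma dfsCompMin_memK (c comp order : List Int) (k : Int) :
    dfsCompMin c comp order k
      = match PySem.List.min? ((memK comp order k).map
          (fun v => PySem.List.pyGetD c (v - 1) 0)) (fun y : Int => y) with
        | some m => m
        | none => 0 := rfl

lemma dfsCompMin_congr (c : List Int) {comp order comp' order' : List Int} (k : Int)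
    (h : memK comp order k = memK comp' order' k) :
    dfsCompMin c comp order k = dfsCompMin c comp' order' k := by
  rw [dfsCompMin_memK, dfsCompMin_memK, h]

lemma dfsCompMin_eq (c comp order : List Int) (k : Int) (h : memK comp order k ≠ []) :
    dfsCompMin c comp order k
      = minNE ((memK comp order k).map (fun v => PySem.List.pyGetD c (v - 1) 0)) := by
  rw [dfsCompMin_memK]
  cases hm : memK comp order k with
  | nil => exact absurd hm h
  | cons x xs => simp only [List.map, PySem.List.min?_id_cons]; rfl

lemma minNE_concat (xs : List Int) (a : Int) (h : xs ≠ []) :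
    minNE (xs ++ [a]) = min (minNE xs) a := by
  cases xs with
  | nil => exact absurd rfl h
  | cons x t => simp [minNE, List.foldl_append]

-- pyGetD after pySetD at a valid nonnegative index, read at a nonnegative index
lemma getD_setD {γ : Type} (xs : List γ) (i j : Int) (v d : γ)
    (hi0 : 0 ≤ i) (hi : i < (xs.length : Int)) (hj : 0 ≤ j) :
    PySem.List.pyGetD (PySem.List.pySetD xs i v) j d
      = if j = i then v else PySem.List.pyGetD xs j d := by
  rw [PySem.List.pySetD_of_nonneg _ _ hi0, PySem.List.pyGetD_of_nonneg _ _ hj,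
      PySem.List.pyGetD_of_nonneg _ _ hj]
  by_cases h : j = i
  · subst h
    have hlt : j.toNat < xs.length := by omega
    simp [List.getD, hlt]
  · have hne : i.toNat ≠ j.toNat := by omega
    simp [List.getD, hne, if_neg h]

lemma pyGetD_replicate {γ : Type} (m : Nat) (a d : γ) (j : Int) (hj : 0 ≤ j) :
    PySem.List.pyGetD (List.replicate m a) j d = if j.toNat < m then a else d := by
  rw [PySem.List.pyGetD_of_nonneg _ _ hj]
  by_cases h : j.toNat < m
  · simp [List.getD, h]
  · simp [List.getD, h]

-- first-match dict lookup lands on an entry of the association list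
lemma dict_get?_mem (graph : List (Int × List Int)) (k : Int) (v : List Int)
    (h : PySem.Dict.get? ⟨graph⟩ k = some v) : (k, v) ∈ graph := by
  induction graph with
  | nil => simp [PySem.Dict.get?] at h
  | cons p rest ih =>
    rw [show (⟨p :: rest⟩ : PySem.Dict Int (List Int)) = ⟨(p.1, p.2) :: rest⟩ by rfl,
        PySem.Dict.get?_mk_cons] at h
    by_cases hk : p.1 == k
    · rw [if_pos hk] at h
      have hp : p = (k, v) := by
        have h1 : p.1 = k := by simpa using hk
        have h2 : p.2 = v := by simpa using h
        cases p; simp_all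
      rw [hp]; exact List.mem_cons_self
    · rw [if_neg hk] at h
      right; exact ih h

-- visited/comp correspondence: same length, visited[j] ⟺ comp[j] ≠ 0
def RelVC (visited : List Bool) (comp : List Int) : Prop :=
  visited.length = comp.length ∧
  ∀ j : Int, 0 ≤ j →
    (PySem.List.pyGetD visited j false = true ↔ PySem.List.pyGetD comp j 0 ≠ 0)

-- invariant carried through the DFS of one component (stack excluded)
def WI0 (n : Int) (c comp order : List Int) (cid : Int) (visited : List Bool)
    (tempC : Int) : Prop :=
  RelVC visited comp ∧
  comp.length = (n + 1).toNat ∧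
  (∀ v ∈ order, (1 ≤ v ∧ v ≤ n) ∧ PySem.List.pyGetD comp v 0 ≠ 0) ∧
  (∀ j : Int, 0 ≤ j → 0 ≤ PySem.List.pyGetD comp j 0 ∧ PySem.List.pyGetD comp j 0 ≤ cid) ∧
  1 ≤ cid ∧
  memK comp order cid ≠ [] ∧
  tempC = minNE ((memK comp order cid).map (fun v => PySem.List.pyGetD c (v - 1) 0))

-- what one component's DFS does to (comp, order): labels only fresh nodes, with cid
def Post (cid : Int) (comp order comp' order' : List Int) : Prop :=
  (∀ j : Int, 0 ≤ j → PySem.List.pyGetD comp j 0 ≠ 0 →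
      PySem.List.pyGetD comp' j 0 = PySem.List.pyGetD comp j 0) ∧
  (∃ Δ, order' = order ++ Δ ∧ ∀ v ∈ Δ, 0 ≤ v ∧ PySem.List.pyGetD comp' v 0 = cid)

lemma Post_refl (cid : Int) (comp order : List Int) : Post cid comp order comp order :=
  ⟨fun _ _ _ => rfl, [], by simp, by simp⟩

lemma Post_trans {cid : Int} {c1 o1 c2 o2 c3 o3 : List Int} (hcid : 1 ≤ cid)
    (h1 : Post cid c1 o1 c2 o2) (h2 : Post cid c2 o2 c3 o3) : Post cid c1 o1 c3 o3 := by
  obtain ⟨p1, Δ1, e1, l1⟩ := h1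
  obtain ⟨p2, Δ2, e2, l2⟩ := h2
  refine ⟨fun j hj h0 => by rw [p2 j hj, p1 j hj h0]; rw [p1 j hj h0]; exact h0,
    Δ1 ++ Δ2, by rw [e2, e1, List.append_assoc], fun v hv => ?_⟩
  rcases List.mem_append.mp hv with hv | hv
  · obtain ⟨hv0, hvl⟩ := l1 v hv
    exact ⟨hv0, by rw [p2 v hv0 (by rw [hvl]; omega), hvl]⟩
  · exact l2 v hv

lemma memK_of_post {cid k : Int} {comp order comp' order' : List Int}
    (hord : ∀ v ∈ order, (0 ≤ v) ∧ PySem.List.pyGetD comp v 0 ≠ 0)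
    (hp : Post cid comp order comp' order') (hk : k ≠ cid) :
    memK comp' order' k = memK comp order k := by
  obtain ⟨pres, Δ, he, hl⟩ := hp
  unfold memK
  rw [he, List.filter_append]
  have h1 : List.filter (fun v => PySem.List.pyGetD comp' v 0 == k) Δ = [] := by
    rw [List.filter_eq_nil_iff]
    intro v hv
    rw [(hl v hv).2]
    simpa using fun h => hk h.symm
  have h2 : List.filter (fun v => PySem.List.pyGetD comp' v 0 == k) order
      = List.filter (fun v => PySem.List.pyGetD comp v 0 == k) order := by
    apply List.filter_congr
    intro v hv
    rw [pres v (hord v hv).1 (hord v hv).2]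
  rw [h1, h2, List.append_nil]

-- one iteration of the inner "for child in …" loop, in lockstep
lemma childStep (n : Int) (c : List Int) (cid : Int) (ch : Int) (hch : 1 ≤ ch ∧ ch ≤ n)
    (visited : List Bool) (comp order stack : List Int) (tempC : Int)
    (h : WI0 n c comp order cid visited tempC) (hs : ∀ v ∈ stack, 1 ≤ v ∧ v ≤ n) :
    let ra := dfsChildA c (visited, stack, tempC) ch
    let rb := dfsChildB cid (comp, order, stack) ch
    WI0 n c rb.1 rb.2.1 cid ra.1 ra.2.2 ∧ ra.2.1 = rb.2.2 ∧
      (∀ v ∈ ra.2.1, 1 ≤ v ∧ v ≤ n) ∧ Post cid comp order rb.1 rb.2.1 := by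
  obtain ⟨⟨hlen, hrel⟩, hclen, hord, hlab, hcid, hne, htc⟩ := h
  have hch0 : (0 : Int) ≤ ch := by omega
  have hlenc : (comp.length : Int) = n + 1 := by rw [hclen]; omega
  by_cases hb : PySem.List.pyGetD comp ch 0 = 0
  · have hA : PySem.List.pyGetD visited ch false = false := by
      cases hv : PySem.List.pyGetD visited ch false with
      | false => rfl
      | true => exact absurd hb ((hrel ch hch0).mp hv)
    have gc : ∀ j : Int, 0 ≤ j → PySem.List.pyGetD (PySem.List.pySetD comp ch cid) j 0
        = if j = ch then cid else PySem.List.pyGetD comp j 0 :=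
      fun j hj => getD_setD comp ch j cid 0 hch0 (by omega) hj
    have gv : ∀ j : Int, 0 ≤ j → PySem.List.pyGetD (PySem.List.pySetD visited ch true) j false
        = if j = ch then true else PySem.List.pyGetD visited j false :=
      fun j hj => getD_setD visited ch j true false hch0 (by rw [hlen]; omega) hj
    have hordne : ∀ v ∈ order, v ≠ ch := by
      intro v hv hvch
      exact (hord v hv).2 (hvch ▸ hb)
    have hmemK : memK (PySem.List.pySetD comp ch cid) (order ++ [ch]) cid
        = memK comp order cid ++ [ch] := by
      unfold memK
      rw [List.filter_append]
      congr 1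
      · apply List.filter_congr
        intro v hv
        rw [gc v (by have := (hord v hv).1.1; omega), if_neg (hordne v hv)]
      · simp [gc ch hch0]
    simp only [dfsChildA, dfsChildB, hA, hb, if_pos]
    refine ⟨⟨⟨?_, ?_⟩, ?_, ?_, ?_, hcid, ?_, ?_⟩, by trivial, ?_, ?_⟩
    · simp [PySem.List.length_pySetD, hlen]
    · intro j hj
      rw [gv j hj, gc j hj]
      split_ifs with hji
      · simp; omega
      · exact hrel j hj
    · simp [PySem.List.length_pySetD, hclen]
    · intro v hv
      rcases List.mem_append.mp hv with hv | hv
      · refine ⟨(hord v hv).1, ?_⟩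
        rw [gc v (by have := (hord v hv).1.1; omega), if_neg (hordne v hv)]
        exact (hord v hv).2
      · simp at hv
        rw [hv]
        refine ⟨hch, ?_⟩
        rw [gc ch hch0, if_pos rfl]; omega
    · intro j hj
      rw [gc j hj]
      split_ifs with hji
      · omega
      · exact hlab j hj
    · rw [hmemK]; simp
    · rw [hmemK, List.map_append]
      simp only [List.map_cons, List.map_nil]
      rw [minNE_concat _ _ (by simpa using hne), ← htc]
    · intro v hv
      rcases List.mem_append.mp hv with hv | hv
      · exact hs v hv
      · simp at hv; rw [hv]; exact hch
    · refine ⟨?_, [ch], rfl, ?_⟩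
      · intro j hj h0
        have hji : j ≠ ch := fun e => h0 (by rw [e]; exact hb)
        rw [gc j hj, if_neg hji]
      · intro v hv
        simp at hv
        rw [hv, gc ch hch0, if_pos rfl]
        exact ⟨hch0, rfl⟩
  · have hA : PySem.List.pyGetD visited ch false = true := by
      cases hv : PySem.List.pyGetD visited ch false with
      | true => rfl
      | false =>
        exact absurd ((hrel ch hch0).mpr hb) (by simp [hv])
    simp only [dfsChildA, dfsChildB, hA, hb]
    rw [if_neg (by simp)]
    exact ⟨⟨⟨hlen, hrel⟩, hclen, hord, hlab, hcid, hne, htc⟩, by trivial, hs,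
      Post_refl cid comp order⟩

lemma childFold (n : Int) (c : List Int) (cid : Int) (children : List Int)
    (hch : ∀ ch ∈ children, 1 ≤ ch ∧ ch ≤ n)
    (visited : List Bool) (comp order stack : List Int) (tempC : Int)
    (h : WI0 n c comp order cid visited tempC) (hs : ∀ v ∈ stack, 1 ≤ v ∧ v ≤ n) :
    let ra := children.foldl (dfsChildA c) (visited, stack, tempC)
    let rb := children.foldl (dfsChildB cid) (comp, order, stack)
    WI0 n c rb.1 rb.2.1 cid ra.1 ra.2.2 ∧ ra.2.1 = rb.2.2 ∧
      (∀ v ∈ ra.2.1, 1 ≤ v ∧ v ≤ n) ∧ Post cid comp order rb.1 rb.2.1 := by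
  have hcid : 1 ≤ cid := h.2.2.2.2.1
  induction children generalizing visited comp order stack tempC with
  | nil => exact ⟨h, rfl, hs, Post_refl cid comp order⟩
  | cons ch tl ih =>
    obtain ⟨hW, hseq, hsb, hpost⟩ :=
      childStep n c cid ch (hch ch (by simp)) visited comp order stack tempC h hs
    simp only [List.foldl_cons]
    rcases hra : dfsChildA c (visited, stack, tempC) ch with ⟨v1, s1, t1⟩
    rcases hrb : dfsChildB cid (comp, order, stack) ch with ⟨c1, o1, s1'⟩
    rw [hra] at hW hseq hsb
    rw [hrb] at hW hseq hpost
    simp only at hW hseq hsb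
    subst hseq
    have hrec := ih (fun ch' h' => hch ch' (by simp [h'])) v1 c1 o1 s1 t1 hW hsb
    exact ⟨hrec.1, hrec.2.1, hrec.2.2.1, Post_trans hcid hpost hrec.2.2.2⟩

lemma whileAB (graph : List (Int × List Int)) (n : Int) (c : List Int) (cid : Int)
    (hg : ∀ temp : Int, 1 ≤ temp → temp ≤ n →
        ∀ ch ∈ graphGet graph temp, 1 ≤ ch ∧ ch ≤ n) :
    ∀ (fuel : Nat) (visited : List Bool) (comp order stack : List Int) (tempC : Int),
    WI0 n c comp order cid visited tempC → (∀ v ∈ stack, 1 ≤ v ∧ v ≤ n) →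
    let ra := dfsWhileA graph c fuel visited stack tempC
    let rb := dfsWhileB graph cid fuel comp order stack
    WI0 n c rb.1 rb.2 cid ra.1 ra.2 ∧ Post cid comp order rb.1 rb.2 := by
  intro fuel
  induction fuel with
  | zero =>
    intro visited comp order stack tempC h _hs
    exact ⟨h, Post_refl cid comp order⟩
  | succ fuel ih =>
    intro visited comp order stack tempC h hs
    have hcid : 1 ≤ cid := h.2.2.2.2.1
    simp only [dfsWhileA, dfsWhileB]
    rcases List.eq_nil_or_concat stack with rfl | ⟨ys, x, rfl⟩
    · rw [show PySem.List.pop? ([] : List Int) = none from rfl]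
      exact ⟨h, Post_refl cid comp order⟩
    · simp only [List.concat_eq_append] at hs ⊢
      rw [PySem.List.pop?_last]
      have hx := hs x (by simp)
      have hys : ∀ v ∈ ys, 1 ≤ v ∧ v ≤ n := fun v hv => hs v (by simp [hv])
      obtain ⟨hW, hseq, hsb, hpost⟩ := childFold n c cid (graphGet graph x)
        (hg x hx.1 hx.2) visited comp order ys tempC h hys
      rcases h1 : (graphGet graph x).foldl (dfsChildA c) (visited, ys, tempC)
        with ⟨v1, s1, t1⟩
      rcases h2 : (graphGet graph x).foldl (dfsChildB cid) (comp, order, ys)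
        with ⟨c1, o1, s1'⟩
      rw [h1] at hW hseq hsb
      rw [h2] at hW hseq hpost
      simp only at hW hseq hsb
      subst hseq
      dsimp only
      rw [h1, h2]
      have hrec := ih v1 c1 o1 s1 t1 hW hsb
      exact ⟨hrec.1, Post_trans hcid hpost hrec.2⟩

-- invariant of the outer loop
def OI (n : Int) (c comp order : List Int) (cid : Int) (visited : List Bool)
    (result : Int) : Prop :=
  RelVC visited comp ∧
  comp.length = (n + 1).toNat ∧
  (∀ v ∈ order, (1 ≤ v ∧ v ≤ n) ∧ PySem.List.pyGetD comp v 0 ≠ 0) ∧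
  (∀ j : Int, 0 ≤ j → 0 ≤ PySem.List.pyGetD comp j 0 ∧ PySem.List.pyGetD comp j 0 ≤ cid) ∧
  0 ≤ cid ∧
  result = ((PySem.List.pyRange 1 (cid + 1)).map (dfsCompMin c comp order)).sum

lemma outerFold (graph : List (Int × List Int)) (n : Int) (c : List Int)
    (hg : ∀ temp : Int, 1 ≤ temp → temp ≤ n →
        ∀ ch ∈ graphGet graph temp, 1 ≤ ch ∧ ch ≤ n) :
    ∀ (l : List Int), (∀ i ∈ l, 1 ≤ i ∧ i ≤ n) →
    ∀ (visited : List Bool) (comp order : List Int) (cid result : Int),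
    OI n c comp order cid visited result →
    let ra := l.foldl (dfsRootA graph c) (visited, result)
    let rb := l.foldl (dfsRootB graph) (comp, order, cid)
    OI n c rb.1 rb.2.1 rb.2.2 ra.1 ra.2 := by
  intro l
  induction l with
  | nil => intro _ visited comp order cid result h; exact h
  | cons i tl ih =>
    intro hl visited comp order cid result h
    obtain ⟨⟨hlen, hrel⟩, hclen, hord, hlab, hcid0, hres⟩ := h
    have hi := hl i (by simp)
    have hi0 : (0 : Int) ≤ i := by omega
    have hlenc : (comp.length : Int) = n + 1 := by rw [hclen]; omega
    simp only [List.foldl_cons, dfsRootA, dfsRootB]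
    by_cases hb : PySem.List.pyGetD comp i 0 = 0
    · have hA : PySem.List.pyGetD visited i false = false := by
        cases hv : PySem.List.pyGetD visited i false with
        | false => rfl
        | true => exact absurd hb ((hrel i hi0).mp hv)
      simp only [hA, hb, if_pos]
      have gc : ∀ j : Int, 0 ≤ j →
          PySem.List.pyGetD (PySem.List.pySetD comp i (cid + 1)) j 0
            = if j = i then cid + 1 else PySem.List.pyGetD comp j 0 :=
        fun j hj => getD_setD comp i j (cid + 1) 0 hi0 (by omega) hj
      have gv : ∀ j : Int, 0 ≤ j →
          PySem.List.pyGetD (PySem.List.pySetD visited i true) j false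
            = if j = i then true else PySem.List.pyGetD visited j false :=
        fun j hj => getD_setD visited i j true false hi0 (by rw [hlen]; omega) hj
      have hordne : ∀ v ∈ order, v ≠ i := fun v hv hvi => (hord v hv).2 (hvi ▸ hb)
      have hordpres : ∀ v ∈ order,
          PySem.List.pyGetD (PySem.List.pySetD comp i (cid + 1)) v 0
            = PySem.List.pyGetD comp v 0 := by
        intro v hv
        rw [gc v (by have := (hord v hv).1.1; omega), if_neg (hordne v hv)]
      have hmemK : ∀ k : Int, k ≤ cid →
          memK (PySem.List.pySetD comp i (cid + 1)) (order ++ [i]) k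
            = memK comp order k := by
        intro k hk
        unfold memK
        rw [List.filter_append]
        have h2 : List.filter
            (fun v => PySem.List.pyGetD (PySem.List.pySetD comp i (cid + 1)) v 0 == k)
            [i] = [] := by
          simp only [List.filter, gc i hi0]
          have : ¬ ((cid + 1 : Int) == k) = true := by simpa using (by omega : cid + 1 ≠ k)
          simp [this]
        rw [h2, List.append_nil]
        apply List.filter_congr
        intro v hv
        rw [hordpres v hv]
      have hmemKi : memK (PySem.List.pySetD comp i (cid + 1)) (order ++ [i]) (cid + 1)
          = [i] := by
        unfold memK
        rw [List.filter_append]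
        have h1 : List.filter
            (fun v => PySem.List.pyGetD (PySem.List.pySetD comp i (cid + 1)) v 0 == cid + 1)
            order = [] := by
          rw [List.filter_eq_nil_iff]
          intro v hv
          rw [hordpres v hv]
          have := (hlab v (by have := (hord v hv).1.1; omega)).2
          simpa using (by omega : PySem.List.pyGetD comp v 0 ≠ cid + 1)
        rw [h1]
        simp [List.filter, gc i hi0]
      have hWent : WI0 n c (PySem.List.pySetD comp i (cid + 1)) (order ++ [i]) (cid + 1)
          (PySem.List.pySetD visited i true) (PySem.List.pyGetD c (i - 1) 0) := by
        refine ⟨⟨?_, ?_⟩, ?_, ?_, ?_, by omega, ?_, ?_⟩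
        · simp [PySem.List.length_pySetD, hlen]
        · intro j hj
          rw [gv j hj, gc j hj]
          split_ifs with hji
          · simp; omega
          · exact hrel j hj
        · simp [PySem.List.length_pySetD, hclen]
        · intro v hv
          rcases List.mem_append.mp hv with hv | hv
          · exact ⟨(hord v hv).1, by rw [hordpres v hv]; exact (hord v hv).2⟩
          · simp at hv
            rw [hv]
            exact ⟨hi, by rw [gc i hi0, if_pos rfl]; omega⟩
        · intro j hj
          rw [gc j hj]
          split_ifs with hji
          · omega
          · have := hlab j hj; omega
        · rw [hmemKi]; simp
        · rw [hmemKi]; rfl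
      have hfuel : (PySem.List.pySetD comp i (cid + 1)).length + 1
          = (PySem.List.pySetD visited i true).length + 1 := by
        simp [PySem.List.length_pySetD, hlen]
      rw [hfuel]
      have hwl := whileAB graph n c (cid + 1) hg
        ((PySem.List.pySetD visited i true).length + 1)
        (PySem.List.pySetD visited i true) (PySem.List.pySetD comp i (cid + 1))
        (order ++ [i]) [i] (PySem.List.pyGetD c (i - 1) 0) hWent
        (by intro v hv; simp at hv; rw [hv]; exact hi)
      rcases hw1 : dfsWhileA graph c ((PySem.List.pySetD visited i true).length + 1)
          (PySem.List.pySetD visited i true) [i] (PySem.List.pyGetD c (i - 1) 0)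
        with ⟨v2, t2⟩
      rcases hw2 : dfsWhileB graph (cid + 1) ((PySem.List.pySetD visited i true).length + 1)
          (PySem.List.pySetD comp i (cid + 1)) (order ++ [i]) [i]
        with ⟨c2, o2⟩
      rw [hw1, hw2] at hwl
      simp only at hwl
      obtain ⟨hWf, hpostf⟩ := hwl
      obtain ⟨⟨hlen2, hrel2⟩, hclen2, hord2, hlab2, _, hne2, htc2⟩ := hWf
      have hOI : OI n c c2 o2 (cid + 1) v2 (result + t2) := by
        refine ⟨⟨hlen2, hrel2⟩, hclen2, hord2, hlab2, by omega, ?_⟩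
        rw [PySem.List.pyRange_one_succ_right (by omega : (1 : Int) ≤ cid + 1),
            List.map_append, List.sum_append]
        have hmaps : (PySem.List.pyRange 1 (cid + 1)).map (dfsCompMin c c2 o2)
            = (PySem.List.pyRange 1 (cid + 1)).map (dfsCompMin c comp order) := by
          apply List.map_congr_left
          intro k hk
          obtain ⟨hk1, hk2⟩ := PySem.List.mem_pyRange_one.mp hk
          have hkne : k ≠ cid + 1 := by omega
          have e1 : memK c2 o2 k
              = memK (PySem.List.pySetD comp i (cid + 1)) (order ++ [i]) k := by
            apply memK_of_post _ hpostf hkne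
            intro v hv
            obtain ⟨⟨hv1, _⟩, hv2⟩ := hWent.2.2.1 v hv
            exact ⟨by omega, hv2⟩
          rw [dfsCompMin_congr c k (e1.trans (hmemK k (by omega)))]
        rw [hmaps]
        have hterm : dfsCompMin c c2 o2 (cid + 1) = t2 := by
          rw [dfsCompMin_eq c c2 o2 (cid + 1) hne2, ← htc2]
        simp [hterm, ← hres]
      exact ih (fun i' h' => hl i' (by simp [h'])) v2 c2 o2 (cid + 1) (result + t2) hOI
    · have hA : PySem.List.pyGetD visited i false = true := by
        cases hv : PySem.List.pyGetD visited i false with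
        | true => rfl
        | false => exact absurd ((hrel i hi0).mpr hb) (by simp [hv])
      rw [if_neg hb, if_neg (by simp [hA])]
      rw [show result + 0 = result from add_zero result]
      exact ih (fun i' h' => hl i' (by simp [h'])) visited comp order cid result
        ⟨⟨hlen, hrel⟩, hclen, hord, hlab, hcid0, hres⟩

-- ===== VERDICT (by name: the statement is the Claim_ definition above) =====
theorem dfs_spec : Claim_equal_dfs := by
  intro graph n c _hdom hpre
  obtain ⟨hlen, hkeys, hdeg⟩ := hpre
  have hg : ∀ temp : Int, 1 ≤ temp → temp ≤ n →
      ∀ ch ∈ graphGet graph temp, 1 ≤ ch ∧ ch ≤ n := by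
    intro temp h1 h2 ch hch
    have hk := hkeys temp (PySem.List.mem_pyRange_one.mpr ⟨h1, by omega⟩)
    cases hv : PySem.Dict.get? (⟨graph⟩ : PySem.Dict Int (List Int)) temp with
    | none => rw [hv] at hk; simp at hk
    | some v =>
      have hmem := dict_get?_mem graph temp v hv
      have : graphGet graph temp = v := by
        unfold graphGet PySem.Dict.getD; rw [hv]; rfl
      rw [this] at hch
      exact hdeg (temp, v) hmem h1 h2 ch hch
  have h0 : OI n c (List.replicate (n + 1).toNat (0 : Int)) [] 0
      (List.replicate (n + 1).toNat false) 0 := by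
    refine ⟨⟨by simp, fun j hj => ?_⟩, by simp, by simp, fun j hj => ?_, le_refl 0, ?_⟩
    · rw [pyGetD_replicate _ _ _ _ hj, pyGetD_replicate _ _ _ _ hj]
      split_ifs <;> simp
    · rw [pyGetD_replicate _ _ _ _ hj]; split_ifs <;> omega
    · rw [PySem.List.pyRange_one_eq_nil (by omega)]; simp
  have hmain := outerFold graph n c hg (PySem.List.pyRange 1 (n + 1))
    (fun i hi => by
      obtain ⟨h1, h2⟩ := PySem.List.mem_pyRange_one.mp hi
      exact ⟨h1, by omega⟩)
    (List.replicate (n + 1).toNat false) (List.replicate (n + 1).toNat (0 : Int))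
    [] 0 0 h0
  show dfs graph n c = dfs_alt graph n c
  unfold dfs dfs_alt
  exact hmain.2.2.2.2.2
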